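-- pv_equiv track=rewrite | github.com/saisurbehera/prime-rl | src/zeroband/inference/genesys/deepcoder.py | clean_code_main_block
-- ===== SOURCE A (Python) =====
-- def clean_code_main_block(code: str) -> str:
--     """
--     Removes `if __name__ == "__main__"` blocks from Python code.
--
--     Args:
--         code (str): The input Python code.
--
--     Returns:
--         str: Cleaned code without the main execution block.
--     """
--     code_lines = code.split('\n')
--     filtered_lines = []
--     skip_block = False
--
--     for line in code_lines:
--         if line.strip().startswith('if __name__ == "__main__"') or line.strip().startswith("if __name__ == '__main__'"):
--             skip_block = True
--             continue
--         if skip_block: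
--             # Check if we're out of the block (less indentation)
--             if line.strip() and not line.startswith(' ') and not line.startswith('\t'):
--                 skip_block = False
--             else:
--                 continue
--         filtered_lines.append(line)
--
--     return '\n'.join(filtered_lines)
-- ===== SOURCE B (Python) =====
-- def clean_code_main_block(code: str) -> str:
--     """Removes `if __name__ == "__main__"` blocks from Python code.
--
--     Staged approach: first group the lines into "paragraphs" that each start at
--     a dedented non-empty line (blank/indented lines attach to the current
--     paragraph), then truncate every paragraph at its first main-guard line.
--     A guard discards exactly the rest of its paragraph, which is its block.
--     """
--     def is_guard(line):
--         s = line.strip()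
--         return s.startswith('if __name__ == "__main__"') or s.startswith("if __name__ == '__main__'")
--
--     def is_cont(line):
--         return not line.strip() or line.startswith(' ') or line.startswith('\t')
--
--     paragraphs = []
--     for line in code.split('\n'):
--         if paragraphs and is_cont(line):
--             paragraphs[-1].append(line)
--         else:
--             paragraphs.append([line])
--
--     kept = []
--     for para in paragraphs:
--         for line in para:
--             if is_guard(line):
--                 break
--             kept.append(line)
--     return '\n'.join(kept)
-- ===== Notes on version B (the rewrite author's own statement) =====
-- stated objective: alternative
-- what changed: Replaced A's single-pass boolean skip-flag state machine with two staged passes: first group the lines into paragraphs that each start at a dedented non-empty line, then truncate every paragraph at its first main-guard line.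
import Mathlib
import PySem

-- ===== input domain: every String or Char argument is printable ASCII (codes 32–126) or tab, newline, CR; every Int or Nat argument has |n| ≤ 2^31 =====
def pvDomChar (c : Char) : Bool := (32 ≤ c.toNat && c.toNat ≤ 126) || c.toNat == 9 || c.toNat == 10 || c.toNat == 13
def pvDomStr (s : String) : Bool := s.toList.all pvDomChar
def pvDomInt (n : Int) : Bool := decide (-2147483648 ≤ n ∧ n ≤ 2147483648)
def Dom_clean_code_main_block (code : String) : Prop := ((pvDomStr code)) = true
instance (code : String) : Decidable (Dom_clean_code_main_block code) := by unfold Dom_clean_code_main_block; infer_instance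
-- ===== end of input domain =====

-- B replaces A's single-pass skip-flag state machine by two staged passes:
-- group the lines into dedent-started paragraphs, then truncate each paragraph
-- at its first main-guard line; objective: alternative decomposition, same cost.

-- ===== PORT A =====
-- line.strip().startswith('if __name__ == "__main__"') or … (the guard test, verbatim in both Pythons)
def pvGuard (line : String) : Bool :=
  PySem.Str.startswith (PySem.Str.strip line) "if __name__ == \"__main__\"" ||
  PySem.Str.startswith (PySem.Str.strip line) "if __name__ == '__main__'"

-- the for-loop of A: state = (filtered_lines, skip_block)
def pvLoopA : List String → List String → Bool → List String
  | [], acc, _ => acc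
  | line :: rest, acc, skip =>
    if pvGuard line then pvLoopA rest acc true
    else if skip then
      if PySem.Str.strip line != "" && !(PySem.Str.startswith line " ") && !(PySem.Str.startswith line "\t") then
        pvLoopA rest (acc ++ [line]) false
      else
        pvLoopA rest acc skip
    else pvLoopA rest (acc ++ [line]) skip

-- code.split('\n'): split? is none only for sep = "", so getD [] is never taken
def clean_code_main_block (code : String) : String :=
  PySem.Str.join "\n" (pvLoopA ((PySem.Str.split? code "\n").getD []) [] false)

-- ===== PORT B =====
-- is_cont of Source B: not line.strip() or line.startswith(' ') or line.startswith('\t')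
def pvCont (line : String) : Bool :=
  PySem.Str.strip line == "" || PySem.Str.startswith line " " || PySem.Str.startswith line "\t"

-- one step of Source B's grouping loop: attach a continuation line to the last
-- paragraph, otherwise start a new paragraph
def pvAddLine (paras : List (List String)) (l : String) : List (List String) :=
  if !paras.isEmpty && pvCont l then paras.dropLast ++ [paras.getLast! ++ [l]]
  else paras ++ [[l]]

-- Source B pass 1: paragraphs
def pvParagraphs (lines : List String) : List (List String) :=
  lines.foldl pvAddLine []

-- Source B inner for with break: a paragraph up to (excluding) its first guard line
def pvTakeChunk : List String → List String
  | [] => []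
  | l :: rest => if pvGuard l then [] else l :: pvTakeChunk rest

def clean_code_main_block_alt (code : String) : String :=
  PySem.Str.join "\n"
    ((pvParagraphs ((PySem.Str.split? code "\n").getD [])).foldl
      (fun kept para => kept ++ pvTakeChunk para) [])

-- ===== PRECONDITION & SPEC =====
def Spec_clean_code_main_block (code : String) (out : String) : Prop := out = clean_code_main_block_alt code
instance (code : String) (out : String) : Decidable (Spec_clean_code_main_block code out) := by unfold Spec_clean_code_main_block; infer_instance

-- ===== CLAIM (what is proved, stated in full; the proofs are below) =====
def Claim_equal_clean_code_main_block : Prop := ∀ (code : String), Dom_clean_code_main_block code → Spec_clean_code_main_block code (clean_code_main_block code)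

-- ===== LEMMAS AND PROOFS =====

-- recursive characterisation of Source B's grouping pass
def pvParaRec : List String → List (List String)
  | [] => []
  | l :: rest =>
      (l :: rest.takeWhile pvCont) :: pvParaRec (rest.dropWhile pvCont)
termination_by ls => ls.length
decreasing_by
  exact Nat.lt_succ_of_le (List.length_dropWhile_le pvCont rest)

theorem pvParaRec_nil : pvParaRec [] = [] := by
  simp only [pvParaRec]

theorem pvParaRec_cons (l : String) (rest : List String) :
    pvParaRec (l :: rest)
      = (l :: rest.takeWhile pvCont) :: pvParaRec (rest.dropWhile pvCont) := by
  simp only [pvParaRec]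

theorem pvParagraphs_go : ∀ (lines : List String) (cs : List (List String)) (c : List String),
    List.foldl pvAddLine (cs ++ [c]) lines
      = cs ++ [c ++ lines.takeWhile pvCont] ++ pvParaRec (lines.dropWhile pvCont) := by
  intro lines
  induction lines with
  | nil => intro cs c; simp [pvParaRec_nil]
  | cons l rest ih =>
    intro cs c
    by_cases hc : pvCont l = true
    · have hstep : pvAddLine (cs ++ [c]) l = cs ++ [c ++ [l]] := by
        simp [pvAddLine, hc]
      rw [List.foldl_cons, hstep, ih cs (c ++ [l]),
        List.takeWhile_cons_of_pos hc, List.dropWhile_cons_of_pos hc]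
      simp
    · have hc' : pvCont l = false := by simpa using hc
      have hstep : pvAddLine (cs ++ [c]) l = (cs ++ [c]) ++ [[l]] := by
        simp [pvAddLine, hc']
      rw [List.foldl_cons, hstep, ih (cs ++ [c]) [l],
        List.takeWhile_cons_of_neg (by simp [hc']),
        List.dropWhile_cons_of_neg (by simp [hc']), pvParaRec_cons]
      simp

theorem pvParagraphs_eq : ∀ lines : List String, pvParagraphs lines = pvParaRec lines := by
  intro lines
  cases lines with
  | nil => simp [pvParagraphs, pvParaRec_nil]
  | cons l rest =>
    have h0 : pvAddLine [] l = [] ++ [[l]] := by simp [pvAddLine]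
    rw [pvParagraphs, List.foldl_cons, h0, pvParagraphs_go rest [] [l], pvParaRec_cons]
    simp

-- the flattened result of Source B's second pass, in recursive form
def pvKeep (lines : List String) : List String :=
  ((pvParaRec lines).map pvTakeChunk).flatten

theorem pvKeep_nil : pvKeep [] = [] := by
  simp [pvKeep, pvParaRec_nil]

theorem pvKeep_cons (l : String) (rest : List String) :
    pvKeep (l :: rest)
      = pvTakeChunk (l :: rest.takeWhile pvCont) ++ pvKeep (rest.dropWhile pvCont) := by
  simp [pvKeep, pvParaRec_cons]

-- A's dedent test is the Boolean negation of B's continuation test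
theorem pvDedent_eq_not (l : String) :
    (PySem.Str.strip l != "" && !(PySem.Str.startswith l " ") && !(PySem.Str.startswith l "\t"))
      = !(pvCont l) := by
  simp only [pvCont, bne]
  generalize (PySem.Str.strip l == "") = a
  generalize (PySem.Str.startswith l " ") = b
  generalize (PySem.Str.startswith l "\t") = c
  revert a b c
  decide

-- in skip state, A consumes a run of continuation lines without output
theorem pvLoopA_skip_run : ∀ (run : List String), (∀ l ∈ run, pvCont l = true) →
    ∀ (rest acc : List String), pvLoopA (run ++ rest) acc true = pvLoopA rest acc true := by
  intro run
  induction run with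
  | nil => intro _ rest acc; rfl
  | cons r run' ih =>
    intro hall rest acc
    have hr : pvCont r = true := hall r (by simp)
    by_cases hg : pvGuard r = true
    · rw [List.cons_append, pvLoopA, if_pos hg, ih (fun l hl => hall l (by simp [hl]))]
    · rw [List.cons_append, pvLoopA, if_neg hg, if_pos rfl,
        if_neg (by rw [pvDedent_eq_not, hr]; decide),
        ih (fun l hl => hall l (by simp [hl]))]

-- out of skip state, A keeps a run of continuation lines up to its first guard;
-- a guard inside the run puts A back into skip state
theorem pvLoopA_false_run : ∀ (run : List String), (∀ l ∈ run, pvCont l = true) →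
    ∀ (rest acc : List String),
    pvLoopA (run ++ rest) acc false
      = pvLoopA rest (acc ++ pvTakeChunk run) (run.any pvGuard) := by
  intro run
  induction run with
  | nil => intro _ rest acc; simp [pvTakeChunk]
  | cons r run' ih =>
    intro hall rest acc
    have hall' : ∀ l ∈ run', pvCont l = true := fun l hl => hall l (by simp [hl])
    by_cases hg : pvGuard r = true
    · rw [List.cons_append, pvLoopA, if_pos hg, pvLoopA_skip_run run' hall']
      simp [pvTakeChunk, hg]
    · rw [List.cons_append, pvLoopA, if_neg hg, if_neg (by simp : ¬ (false = true)),
        ih hall' rest (acc ++ [r])]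
      simp [pvTakeChunk, hg]

-- in skip state at a dedented line (or at the end), A behaves as out of skip state
theorem pvLoopA_skip_off : ∀ (ls acc : List String),
    (∀ h ∈ ls.head?, pvCont h = false) →
    pvLoopA ls acc true = pvLoopA ls acc false := by
  intro ls acc hhd
  cases ls with
  | nil => rfl
  | cons l rest =>
    have hl : pvCont l = false := hhd l rfl
    by_cases hg : pvGuard l = true
    · rw [pvLoopA, if_pos hg, pvLoopA, if_pos hg]
    · rw [pvLoopA, if_neg hg, if_pos rfl, if_pos (by rw [pvDedent_eq_not, hl]; decide),
        pvLoopA, if_neg hg, if_neg (by simp : ¬ (false = true))]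

theorem pvDropWhile_head (ls : List String) :
    ∀ h ∈ (ls.dropWhile pvCont).head?, pvCont h = false := by
  intro h hh
  have hh' : (ls.dropWhile pvCont).head? = some h := hh
  have := List.head?_dropWhile_not pvCont ls
  rw [hh'] at this
  simpa using this

-- main invariant: A's loop equals B's paragraph-and-truncate result
theorem pvLoopA_eq_keep : ∀ (lines acc : List String),
    pvLoopA lines acc false = acc ++ pvKeep lines := by
  intro lines
  induction lines using pvParaRec.induct with
  | case1 => intro acc; simp [pvLoopA, pvKeep_nil]
  | case2 l rest ih =>
    intro acc
    have hrun : ∀ x ∈ rest.takeWhile pvCont, pvCont x = true :=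
      fun x hx => List.mem_takeWhile_imp hx
    by_cases hg : pvGuard l = true
    · calc pvLoopA (l :: rest) acc false
          = pvLoopA rest acc true := by rw [pvLoopA, if_pos hg]
        _ = pvLoopA (rest.takeWhile pvCont ++ rest.dropWhile pvCont) acc true := by
            rw [List.takeWhile_append_dropWhile]
        _ = pvLoopA (rest.dropWhile pvCont) acc true := pvLoopA_skip_run _ hrun _ _
        _ = pvLoopA (rest.dropWhile pvCont) acc false :=
            pvLoopA_skip_off _ _ (pvDropWhile_head rest)
        _ = acc ++ pvKeep (rest.dropWhile pvCont) := ih acc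
        _ = acc ++ pvKeep (l :: rest) := by rw [pvKeep_cons]; simp [pvTakeChunk, hg]
    · have hstep : pvLoopA (l :: rest) acc false = pvLoopA rest (acc ++ [l]) false := by
        rw [pvLoopA, if_neg hg, if_neg (by simp : ¬ (false = true))]
      have hsplit :
          pvLoopA rest (acc ++ [l]) false
            = pvLoopA (rest.dropWhile pvCont)
                ((acc ++ [l]) ++ pvTakeChunk (rest.takeWhile pvCont))
                ((rest.takeWhile pvCont).any pvGuard) := by
        conv_lhs => rw [← List.takeWhile_append_dropWhile (p := pvCont) (l := rest)]
        exact pvLoopA_false_run _ hrun _ _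
      by_cases hb : (rest.takeWhile pvCont).any pvGuard = true
      · rw [hstep, hsplit, hb,
          pvLoopA_skip_off _ _ (pvDropWhile_head rest), ih, pvKeep_cons]
        simp [pvTakeChunk, hg]
      · rw [hstep, hsplit, (by simpa using hb : (rest.takeWhile pvCont).any pvGuard = false),
          ih, pvKeep_cons]
        simp [pvTakeChunk, hg]

-- Source B's second pass (foldl with append) flattens the truncated paragraphs
theorem pvFoldl_append_eq (chunks : List (List String)) :
    ∀ acc : List String,
    chunks.foldl (fun kept para => kept ++ pvTakeChunk para) acc
      = acc ++ (chunks.map pvTakeChunk).flatten := by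
  induction chunks with
  | nil => intro acc; simp
  | cons c cs ih => intro acc; simp [ih]

-- ===== VERDICT (by name: the statement is the Claim_ definition above) =====
theorem clean_code_main_block_spec : Claim_equal_clean_code_main_block := by
  intro code _
  unfold Spec_clean_code_main_block clean_code_main_block clean_code_main_block_alt
  rw [pvFoldl_append_eq, pvParagraphs_eq, pvLoopA_eq_keep]
  rfl
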